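-- pv_equiv track=rewrite | github.com/Xascoria/AdventOfCode2021 | Q4/q4.py | check_board_victory
-- ===== SOURCE A (Python) =====
-- def check_board_victory(board):
--     for i in board:
--         if sum(i)==-5:
--             return True
--     for i in zip(*board):
--         if sum(i) == -5:
--             return True
--     return False
-- ===== SOURCE B (Python) =====
-- def check_board_victory(board):
--     if not board:
--         return False
--     w = min(len(r) for r in board)
--     col = [0] * w
--     for r in board:
--         if sum(r) == -5:
--             return True
--         for j in range(w):
--             col[j] += r[j]
--     return -5 in col
-- ===== Notes on version B (the rewrite author's own statement) =====
-- stated objective: alternative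
-- what changed: Single pass over the rows maintaining running column sums (truncated to the shortest row, matching zip's behaviour) instead of a second pass over an explicit zip(*board) transpose.
import Mathlib
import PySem

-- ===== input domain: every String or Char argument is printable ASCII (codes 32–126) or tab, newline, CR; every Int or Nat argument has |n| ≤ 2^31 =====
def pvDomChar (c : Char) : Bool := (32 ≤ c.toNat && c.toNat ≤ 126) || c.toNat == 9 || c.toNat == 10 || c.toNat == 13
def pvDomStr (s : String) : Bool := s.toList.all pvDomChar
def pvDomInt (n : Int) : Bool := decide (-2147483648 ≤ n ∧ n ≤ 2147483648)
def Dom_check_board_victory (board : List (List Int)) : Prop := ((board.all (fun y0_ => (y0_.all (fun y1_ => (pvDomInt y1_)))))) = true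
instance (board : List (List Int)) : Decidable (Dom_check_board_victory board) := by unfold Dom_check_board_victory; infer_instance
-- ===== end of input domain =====

-- B replaces A's second pass over an explicit zip(*board) transpose by one pass over the
-- rows maintaining running column sums (columns truncated to the shortest row, like zip).

-- ===== PORT A =====
-- hand port of Python's zip(*rows): list of columns, truncated to the shortest row
-- (exact: column j exists iff j < min row length; zip() of no iterables is empty)
def pyZipAll (rows : List (List Int)) : List (List Int) :=
  match rows with
  | [] => []
  | r :: rs =>
    let w := rs.foldl (fun m l => min m l.length) r.length
    (List.range w).map (fun j => (r :: rs).map (fun l => l.getD j 0))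

def check_board_victory (board : List (List Int)) : Bool :=
  if board.any (fun i => i.sum == -5) then true
  else if (pyZipAll board).any (fun i => i.sum == -5) then true
  else false

-- ===== PORT B =====
-- the row loop of Source B: early-return on a winning row, otherwise add the row into col
def altGo (w : Nat) : List (List Int) → List Int → Bool
  | [], col => col.contains (-5)
  | r :: rest, col =>
    if r.sum == -5 then true
    else altGo w rest ((List.range w).map (fun j => col.getD j 0 + r.getD j 0))

def check_board_victory_alt (board : List (List Int)) : Bool :=
  match board with
  | [] => false
  | r :: rs =>
    let w := rs.foldl (fun m l => min m l.length) r.length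
    altGo w (r :: rs) (List.replicate w 0)

-- ===== PRECONDITION & SPEC =====
def Spec_check_board_victory (board : List (List Int)) (out : Bool) : Prop := out = check_board_victory_alt board
instance (board : List (List Int)) (out : Bool) : Decidable (Spec_check_board_victory board out) := by unfold Spec_check_board_victory; infer_instance

-- ===== CLAIM (what is proved, stated in full; the proofs are below) =====
def Claim_equal_check_board_victory : Prop := ∀ (board : List (List Int)), Dom_check_board_victory board → Spec_check_board_victory board (check_board_victory board)

-- ===== LEMMAS AND PROOFS =====

def addRow (w : Nat) (col r : List Int) : List Int :=
  (List.range w).map (fun j => col.getD j 0 + r.getD j 0)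

theorem altGo_eq (w : Nat) (rows : List (List Int)) (col : List Int) :
    altGo w rows col =
      (rows.any (fun i => i.sum == -5) || (rows.foldl (addRow w) col).contains (-5)) := by
  induction rows generalizing col with
  | nil => simp [altGo]
  | cons r rest ih =>
    by_cases h : r.sum = -5
    · simp [altGo, h]
    · have hb : (r.sum == -5) = false := by simpa using h
      simp only [altGo, hb, Bool.false_eq_true, if_false, List.any_cons, Bool.false_or,
        List.foldl_cons]
      exact ih (addRow w col r)

theorem foldl_addRow (w : Nat) (rows : List (List Int)) (col : List Int)
    (hc : col.length = w) :
    rows.foldl (addRow w) col =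
      (List.range w).map (fun j => col.getD j 0 + ((rows.map (fun r => r.getD j 0)).sum)) := by
  induction rows generalizing col with
  | nil =>
    simp only [List.foldl_nil, List.map_nil, List.sum_nil, add_zero]
    refine List.ext_getElem (by simp [hc]) ?_
    intro i h1 h2
    simp only [List.getElem_map, List.getElem_range]
    rw [List.getD_eq_getElem col 0 h1]
  | cons r rest ih =>
    rw [List.foldl_cons, ih (addRow w col r) (by simp [addRow])]
    apply List.map_congr_left
    intro j hj
    have hjw : j < w := List.mem_range.mp hj
    have h1 : (addRow w col r).getD j 0 =  col.getD j 0 + r.getD j 0 := by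
      have : j < (addRow w col r).length := by simp [addRow, hjw]
      rw [List.getD_eq_getElem _ 0 this]
      simp [addRow]
    rw [h1, List.map_cons, List.sum_cons]
    ring

theorem core (board : List (List Int)) :
    check_board_victory board = check_board_victory_alt board := by
  cases board with
  | nil => simp [check_board_victory, check_board_victory_alt, pyZipAll]
  | cons r rs =>
    simp only [check_board_victory, check_board_victory_alt, pyZipAll]
    rw [altGo_eq, foldl_addRow _ _ _ (List.length_replicate)]
    by_cases h : (r :: rs).any (fun i => i.sum == -5)
    · simp [h]
    · simp only [h, Bool.false_or]
      simp [List.any_map, Function.comp]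

-- ===== VERDICT (by name: the statement is the Claim_ definition above) =====
theorem check_board_victory_spec : Claim_equal_check_board_victory := by
  intro board _
  exact core board
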